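-- pv_equiv track=rewrite | github.com/bc6/Paraplegic-Hank-Drake | eve/client/script/ui/services/mail/mailSvc.py | GetLabelMaskAsList
-- ===== SOURCE A (Python) =====
-- def GetLabelMaskAsList(mask):
--     if mask < 0:
--         raise RuntimeError('Invalid label mask', mask)
--     counter = 0
--     labels = []
--     while mask != 0:
--         (mask, bitSet,) = divmod(mask, 2)
--         if bitSet == 1:
--             labels.append(pow(2, counter))
--         counter += 1
--
--     return labels
-- ===== SOURCE B (Python) =====
-- def GetLabelMaskAsList(mask):
--     if mask < 0:
--         raise RuntimeError('Invalid label mask', mask)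
--     if mask == 0:
--         return []
--     rest = [2 * x for x in GetLabelMaskAsList(mask >> 1)]
--     return [1] + rest if mask & 1 else rest
-- ===== Notes on version B (the rewrite author's own statement) =====
-- stated objective: alternative
-- what changed: Replaces A's iterative divmod loop with counter and append-accumulator by a direct recursion on the halved mask that doubles the recursive result with a map and conses 1 for an odd mask, so no counter, pow or accumulator is maintained.
import Mathlib
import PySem

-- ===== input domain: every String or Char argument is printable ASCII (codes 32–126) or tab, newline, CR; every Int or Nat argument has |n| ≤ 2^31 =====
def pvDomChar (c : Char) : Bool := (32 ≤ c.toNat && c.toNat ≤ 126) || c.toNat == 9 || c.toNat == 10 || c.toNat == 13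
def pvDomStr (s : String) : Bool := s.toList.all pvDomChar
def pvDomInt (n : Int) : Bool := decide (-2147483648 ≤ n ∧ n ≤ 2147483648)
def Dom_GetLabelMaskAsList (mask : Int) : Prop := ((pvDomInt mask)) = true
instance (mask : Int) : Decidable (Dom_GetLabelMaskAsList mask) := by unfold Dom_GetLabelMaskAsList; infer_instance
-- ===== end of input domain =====

-- B replaces A's iterative divmod loop (counter + pow + append-accumulator) by a direct
-- recursion on the halved mask, doubling the recursive result and consing 1 for an odd mask.


-- termination helper for B's recursion (cited by name in decreasing_by)
lemma pv_shiftRight_toNat_lt (m : Int) (h : 0 < m) : (m >>> (1 : Nat)).toNat < m.toNat := by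
  have e : m >>> (1 : Nat) = m / 2 := by
    rw [Int.shiftRight_eq_div_pow]; norm_num
  rw [e]; omega

-- ===== PORT A =====
-- `while mask != 0:` ported with a structural fuel counter (mask.toNat + 1 iterations always
-- suffice, since mask halves each turn; fuel is a totality guard only).
-- pow(2, counter): counter starts at 0 and only grows, so `counter.toNat` is exact.
def GetLabelMaskAsListLoop : Nat → Int → Int → List Int → List Int
  | 0, _, _, labels => labels
  | fuel + 1, mask, counter, labels =>
    if mask = 0 then labels
    else
      GetLabelMaskAsListLoop fuel (PySem.Int.floordiv mask 2) (counter + 1)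
        (if PySem.Int.mod mask 2 = 1 then labels ++ [(2 : Int) ^ counter.toNat] else labels)

def GetLabelMaskAsList (mask : Int) : List Int :=
  if mask < 0 then []   -- Python raises RuntimeError('Invalid label mask', mask) here; excluded by Pre_
  else GetLabelMaskAsListLoop (mask.toNat + 1) mask 0 []

-- ===== PORT B =====
-- recursion on mask >> 1; `mask & 1` truthiness is `band mask 1 ≠ 0`.
def GetLabelMaskAsList_alt (mask : Int) : List Int :=
  if _h1 : mask < 0 then []   -- same RuntimeError guard in B; excluded by Pre_
  else if _h2 : mask = 0 then []
  else
    let rest := (GetLabelMaskAsList_alt (mask >>> (1 : Nat))).map (fun x => 2 * x)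
    if PySem.Int.band mask 1 ≠ 0 then 1 :: rest else rest
termination_by mask.toNat
decreasing_by exact pv_shiftRight_toNat_lt mask (by omega)

-- ===== PRECONDITION & SPEC =====
-- Pre_ excludes exactly the inputs where A (and B) raise RuntimeError: mask < 0.
def Pre_GetLabelMaskAsList (mask : Int) : Prop := 0 ≤ mask
instance (mask : Int) : Decidable (Pre_GetLabelMaskAsList mask) := by
  unfold Pre_GetLabelMaskAsList; infer_instance

def pvWitness_GetLabelMaskAsList : Int := 6

def Spec_GetLabelMaskAsList (mask : Int) (out : List Int) : Prop := out = GetLabelMaskAsList_alt mask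
instance (mask : Int) (out : List Int) : Decidable (Spec_GetLabelMaskAsList mask out) := by
  unfold Spec_GetLabelMaskAsList; infer_instance

-- ===== CLAIM (what is proved, stated in full; the proofs are below) =====
def Claim_equal_GetLabelMaskAsList : Prop :=
  ∀ (mask : Int), Dom_GetLabelMaskAsList mask → Pre_GetLabelMaskAsList mask →
    Spec_GetLabelMaskAsList mask (GetLabelMaskAsList mask)

-- ===== LEMMAS AND PROOFS =====

-- B on a positive natCast unfolds to the odd-bit cons plus the doubled half
lemma alt_natCast_pos (a : Nat) (ha : 0 < a) :
    GetLabelMaskAsList_alt (a : Int) =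
      (if a % 2 = 1 then [(1 : Int)] else []) ++
        (GetLabelMaskAsList_alt ((a / 2 : Nat) : Int)).map (fun x => 2 * x) := by
  rw [GetLabelMaskAsList_alt]
  rw [dif_neg (by exact_mod_cast by omega), dif_neg (by exact_mod_cast by omega)]
  have hs : ((a : Int)) >>> (1 : Nat) = ((a / 2 : Nat) : Int) := by
    rw [Int.shiftRight_eq_div_pow]
    rw [pow_one]
    omega
  have hb : PySem.Int.band (a : Int) 1 = ((a % 2 : Nat) : Int) := by
    have := PySem.Int.band_natCast a 1
    simpa [Nat.and_one_is_mod] using this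
  rw [hs, hb]
  by_cases h : a % 2 = 1
  · simp [h]
  · have h0 : a % 2 = 0 := by omega
    simp [h0]

lemma alt_zero : GetLabelMaskAsList_alt 0 = [] := by
  rw [GetLabelMaskAsList_alt]; simp

-- A's loop accumulator splits off
lemma loopA_zero (f : Nat) (c : Int) (labels : List Int) :
    GetLabelMaskAsListLoop f 0 c labels = labels := by
  cases f <;> simp [GetLabelMaskAsListLoop]

lemma loopA_step (f : Nat) (a : Nat) (h : 0 < a) (c : Int) (labels : List Int) :
    GetLabelMaskAsListLoop (f + 1) (a : Int) c labels =
      GetLabelMaskAsListLoop f ((a / 2 : Nat) : Int) (c + 1)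
        (if a % 2 = 1 then labels ++ [(2 : Int) ^ c.toNat] else labels) := by
  rw [GetLabelMaskAsListLoop]
  rw [if_neg (by exact_mod_cast by omega)]
  have hq : PySem.Int.floordiv (a : Int) 2 = ((a / 2 : Nat) : Int) := by
    exact_mod_cast PySem.Int.floordiv_natCast a 2
  have hr : PySem.Int.mod (a : Int) 2 = ((a % 2 : Nat) : Int) := by
    exact_mod_cast PySem.Int.mod_natCast a 2
  rw [hq, hr]
  by_cases hb : a % 2 = 1
  · simp [hb]
  · have h0 : a % 2 = 0 := by omega
    simp [h0]

lemma loopA_acc (a : Nat) : ∀ (f : Nat), a < f → ∀ (c : Int) (labels : List Int),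
    GetLabelMaskAsListLoop f (a : Int) c labels =
      labels ++ GetLabelMaskAsListLoop f (a : Int) c [] := by
  induction a using Nat.strong_induction_on with
  | _ a ih =>
    intro f hf c labels
    rcases Nat.eq_zero_or_pos a with rfl | ha
    · simp [loopA_zero]
    · obtain ⟨f', rfl⟩ : ∃ f', f = f' + 1 := ⟨f - 1, by omega⟩
      rw [loopA_step f' a ha, loopA_step f' a ha (labels := [])]
      rw [ih (a / 2) (by omega) f' (by omega),
        ih (a / 2) (by omega) f' (by omega) (c + 1)
          (if a % 2 = 1 then [] ++ [(2 : Int) ^ c.toNat] else [])]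
      by_cases hb : a % 2 = 1 <;> simp [hb]

-- A's loop computes B's recursion, scaled by the 2^c weight carried in A's counter
lemma loop_main (a : Nat) : ∀ (f c : Nat), a < f →
    GetLabelMaskAsListLoop f (a : Int) (c : Int) [] =
      (GetLabelMaskAsList_alt (a : Int)).map (fun x => x * 2 ^ c) := by
  induction a using Nat.strong_induction_on with
  | _ a ih =>
    intro f c hf
    rcases Nat.eq_zero_or_pos a with rfl | ha
    · simp [loopA_zero, alt_zero]
    · obtain ⟨f1, rfl⟩ : ∃ f1, f = f1 + 1 := ⟨f - 1, by omega⟩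
      have hc1 : ((c : Int)) + 1 = ((c + 1 : Nat) : Int) := by push_cast; ring
      rw [loopA_step f1 a ha, hc1, loopA_acc (a / 2) f1 (by omega),
        ih (a / 2) (by omega) f1 (c + 1) (by omega),
        alt_natCast_pos a ha]
      by_cases hb : a % 2 = 1 <;>
        simp [hb, List.map_map, Function.comp, pow_succ] <;>
        · intro x _; ring

-- ===== VERDICT (by name: the statement is the Claim_ definition above) =====
theorem GetLabelMaskAsList_spec : Claim_equal_GetLabelMaskAsList := by
  intro mask _hdom hpre
  unfold Pre_GetLabelMaskAsList at hpre
  unfold Spec_GetLabelMaskAsList GetLabelMaskAsList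
  rw [if_neg (by omega)]
  have hm : mask = ((mask.toNat : Nat) : Int) := by omega
  rw [hm, show (0 : Int) = ((0 : Nat) : Int) from rfl]
  simp only [Int.toNat_natCast]
  rw [loop_main mask.toNat (mask.toNat + 1) 0 (by omega)]
  simp
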